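-- pv_equiv track=rewrite | github.com/Andres-Queiroz/DIO-atividades | Códigos Python - 1º semestre CC/Aulas/AC2 - PT1.py | tautograma
-- ===== SOURCE A (Python) =====
-- def tautograma(frase):
--   frase  = frase.upper()
--   x = frase.split()
--   w = 0
--   for i in range (len(x)):
--     if x[i][0] == x[0][0]:
--       w = w+1
--   if w == len(x):
--     return("Y")
--   else:
--     return('N')
-- ===== SOURCE B (Python) =====
-- def tautograma(frase):
--   firsts = {w[0] for w in frase.upper().split()}
--   return "Y" if len(firsts) <= 1 else "N"
-- ===== Notes on version B (the rewrite author's own statement) =====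
-- stated objective: idiomatic
-- what changed: Replaces the index loop counting words whose initial matches the first word's initial (then comparing the count to the word count) with a set of distinct initial letters tested for cardinality <= 1.
import Mathlib
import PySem

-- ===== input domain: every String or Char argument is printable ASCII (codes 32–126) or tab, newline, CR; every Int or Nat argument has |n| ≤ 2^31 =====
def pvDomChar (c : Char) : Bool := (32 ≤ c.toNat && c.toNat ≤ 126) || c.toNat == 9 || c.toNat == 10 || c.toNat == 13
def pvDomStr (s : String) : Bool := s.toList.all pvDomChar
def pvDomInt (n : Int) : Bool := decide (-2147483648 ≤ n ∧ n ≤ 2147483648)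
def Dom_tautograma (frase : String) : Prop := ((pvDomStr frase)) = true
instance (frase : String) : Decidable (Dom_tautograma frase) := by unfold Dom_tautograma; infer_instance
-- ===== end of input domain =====

-- B replaces A's match-counter compared to the word count with a set of distinct initial letters tested for cardinality ≤ 1 (idiomatic; same cost).

-- ===== PORT A =====
def tautograma (frase : String) : String :=
  let frase := PySem.Str.upper frase
  let x := PySem.Str.split₀ frase
  let w := (PySem.List.pyRange 0 (PySem.List.len x)).foldl
    (fun w i =>
      if PySem.Str.pyGet? (PySem.List.pyGetD x i "") 0 = PySem.Str.pyGet? (PySem.List.pyGetD x 0 "") 0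
      then w + 1 else w) (0 : Int)
  if w = PySem.List.len x then "Y" else "N"

-- ===== PORT B =====
def tautograma_alt (frase : String) : String :=
  let firsts : PySem.Set (Option Char) :=
    PySem.Set.ofList ((PySem.Str.split₀ (PySem.Str.upper frase)).map (fun w => PySem.Str.pyGet? w 0))
  if PySem.Set.len firsts ≤ 1 then "Y" else "N"

-- ===== PRECONDITION & SPEC =====
def Spec_tautograma (frase : String) (out : String) : Prop := out = tautograma_alt frase
instance (frase : String) (out : String) : Decidable (Spec_tautograma frase out) := by unfold Spec_tautograma; infer_instance

-- ===== CLAIM (what is proved, stated in full; the proofs are below) =====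
def Claim_equal_tautograma : Prop := ∀ (frase : String), Dom_tautograma frase → Spec_tautograma frase (tautograma frase)

-- ===== LEMMAS AND PROOFS =====

-- len of set(l) is ≤ 1 exactly when all elements of l are equal
theorem setLen_le_one_iff {α : Type} [BEq α] [LawfulBEq α] (l : List α) :
    PySem.Set.len (PySem.Set.ofList l) ≤ 1 ↔ ∀ a ∈ l, ∀ b ∈ l, a = b := by
  cases l with
  | nil => simp [PySem.Set.ofList_nil, PySem.Set.len]
  | cons c cs =>
    rw [PySem.Set.ofList_cons]
    have hdisc : ((PySem.Set.ofList cs).discard c = []) ↔ ∀ y ∈ cs, y = c := by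
      constructor
      · intro h y hy
        by_contra hne
        have : y ∈ (PySem.Set.ofList cs).discard c := by
          rw [PySem.Set.mem_discard]
          exact ⟨(PySem.Set.mem_ofList _ _).2 hy, hne⟩
        simp [h] at this
      · intro h
        rw [List.eq_nil_iff_forall_not_mem]
        intro y hy
        rw [PySem.Set.mem_discard, PySem.Set.mem_ofList] at hy
        exact hy.2 (h y hy.1)
    constructor
    · intro h a ha b hb
      have hlen : ((PySem.Set.ofList cs).discard c).length = 0 := by
        unfold PySem.Set.len at h
        simp only [List.length_cons] at h
        omega
      have hnil := List.length_eq_zero_iff.1 hlen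
      have hall := hdisc.1 hnil
      rcases List.mem_cons.1 ha with rfl | ha' <;> rcases List.mem_cons.1 hb with rfl | hb'
      · rfl
      · exact (hall b hb').symm
      · exact hall a ha'
      · exact (hall a ha').trans (hall b hb').symm
    · intro h
      have : (PySem.Set.ofList cs).discard c = [] :=
        hdisc.2 (fun y hy => h y (List.mem_cons_of_mem _ hy) c (List.mem_cons_self))
      simp [PySem.Set.len, this]

-- ===== VERDICT (by name: the statement is the Claim_ definition above) =====
theorem tautograma_spec : Claim_equal_tautograma := by
  intro frase _
  unfold Spec_tautograma tautograma tautograma_alt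
  dsimp only
  set x := PySem.Str.split₀ (PySem.Str.upper frase) with hx
  set f : String → Option Char := fun w => PySem.Str.pyGet? w 0 with hf
  rw [PySem.List.foldl_pyRange_zero_pyGetD x "" (fun w s => if f s = f (PySem.List.pyGetD x 0 "") then w + 1 else w) 0]
  have hcnt : List.foldl (fun w s => if f s = f (PySem.List.pyGetD x 0 "") then w + 1 else w) (0 : Int) x
      = (0 : Int) + (List.countP (fun s => decide (f s = f (PySem.List.pyGetD x 0 ""))) x : Int) := by
    rw [← PySem.List.foldl_count_if (fun s => decide (f s = f (PySem.List.pyGetD x 0 ""))) x 0]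
    simp
  rw [hcnt]
  have hiff :
      ((0 : Int) + (List.countP (fun s => decide (f s = f (PySem.List.pyGetD x 0 ""))) x : Int) = PySem.List.len x)
      ↔ (PySem.Set.len (PySem.Set.ofList (x.map f)) ≤ 1) := by
    rw [setLen_le_one_iff]
    simp only [PySem.List.len_eq, zero_add]
    rw [show ((List.countP (fun s => decide (f s = f (PySem.List.pyGetD x 0 ""))) x : Int) = (x.length : Int))
        ↔ List.countP (fun s => decide (f s = f (PySem.List.pyGetD x 0 ""))) x = x.length from Int.natCast_inj]
    rw [List.countP_eq_length]
    cases x with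
    | nil => simp
    | cons h t =>
      have h0 : PySem.List.pyGetD (h :: t) 0 "" = h := by
        simp [pysem]
      rw [h0]
      constructor
      · intro hall a ha b hb
        rcases List.mem_map.1 ha with ⟨wa, hwa, rfl⟩
        rcases List.mem_map.1 hb with ⟨wb, hwb, rfl⟩
        have ha' := of_decide_eq_true (hall wa hwa)
        have hb' := of_decide_eq_true (hall wb hwb)
        rw [ha', hb']
      · intro hall s hs
        exact decide_eq_true
          (hall (f s) (List.mem_map.2 ⟨s, hs, rfl⟩) (f h) (List.mem_map.2 ⟨h, List.mem_cons_self, rfl⟩))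
  by_cases hc : (0 : Int) + (List.countP (fun s => decide (f s = f (PySem.List.pyGetD x 0 ""))) x : Int) = PySem.List.len x
  · rw [if_pos hc, if_pos (hiff.1 hc)]
  · rw [if_neg hc, if_neg (fun hle => hc (hiff.2 hle))]
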